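-- pv_equiv track=rewrite | github.com/Lugburz/tmx2gbdk | tileset2gbdk.py | get_file_content_c
-- ===== SOURCE A (Python) =====
-- def get_file_content_c(tiles, fname, metadata):
--
--     full_str = """
-- /*
--     {name}.c
--
--     Tile Source File.
--     File generated with tileset2gbdk v0.1
-- */
--
-- #define {name}BytesCount {length}
-- #define {name}TilesCount {tilesc}
--
-- const unsigned char {name}[] =
-- {{
--   {content}
-- }};
--
-- {metadata}
-- """
--     size = len(tiles)
--     content = ''
--     i = 0
--     for byte in tiles:
--         i+=1
--         content += byte
--         if(i < len(tiles)):
--             content += ','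
--         if( i % 8 == 0 and i < len(tiles)):
--             content += "\n  "
--
--     metadata_str = ''
--     if(metadata is not None):
--         for key in metadata:
--             metadata_str += "#define {name}{key}Length {size}\n".format(name=fname, key=key.capitalize(), size=len(metadata[key]))
--             metadata_str += "const unsigned char {name}{key}[] =".format(name=fname, key=key.capitalize())
--             metadata_str += "\n{\n  "
--
--             meta_str = map(str, metadata[key])
--             metadata_str += ','.join(meta_str)
--             metadata_str += "\n};\n"
--
--     return full_str.format(name=fname, content=content, length=size, tilesc=int(size/2/8), metadata=metadata_str)
-- ===== SOURCE B (Python) =====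
-- def get_file_content_c(tiles, fname, metadata):
--
--     full_str = """
-- /*
--     {name}.c
--
--     Tile Source File.
--     File generated with tileset2gbdk v0.1
-- */
--
-- #define {name}BytesCount {length}
-- #define {name}TilesCount {tilesc}
--
-- const unsigned char {name}[] =
-- {{
--   {content}
-- }};
--
-- {metadata}
-- """
--     chunks = [tiles[i:i + 8] for i in range(0, len(tiles), 8)]
--     content = ',\n  '.join(','.join(chunk) for chunk in chunks)
--
--     if metadata is None:
--         metadata_str = ''
--     else:
--         metadata_str = ''.join(
--             "#define {name}{key}Length {size}\n"
--             "const unsigned char {name}{key}[] =\n{{\n  {vals}\n}};\n".format(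
--                 name=fname, key=key.capitalize(), size=len(values),
--                 vals=','.join(map(str, values)))
--             for key, values in metadata.items())
--
--     return full_str.format(name=fname, content=content, length=len(tiles),
--                            tilesc=len(tiles) // 16, metadata=metadata_str)
-- ===== Notes on version B (the rewrite author's own statement) =====
-- stated objective: simpler
-- what changed: Replaces the byte-by-byte accumulation loop with its running index and i%8 / i<len branch conditions by slicing the tiles into chunks of 8 and joining (','.join within a chunk, ',\n '.join between chunks), and builds the metadata section by joining per-item blocks over metadata.items() instead of += accumulation over key lookups.
import Mathlib
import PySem

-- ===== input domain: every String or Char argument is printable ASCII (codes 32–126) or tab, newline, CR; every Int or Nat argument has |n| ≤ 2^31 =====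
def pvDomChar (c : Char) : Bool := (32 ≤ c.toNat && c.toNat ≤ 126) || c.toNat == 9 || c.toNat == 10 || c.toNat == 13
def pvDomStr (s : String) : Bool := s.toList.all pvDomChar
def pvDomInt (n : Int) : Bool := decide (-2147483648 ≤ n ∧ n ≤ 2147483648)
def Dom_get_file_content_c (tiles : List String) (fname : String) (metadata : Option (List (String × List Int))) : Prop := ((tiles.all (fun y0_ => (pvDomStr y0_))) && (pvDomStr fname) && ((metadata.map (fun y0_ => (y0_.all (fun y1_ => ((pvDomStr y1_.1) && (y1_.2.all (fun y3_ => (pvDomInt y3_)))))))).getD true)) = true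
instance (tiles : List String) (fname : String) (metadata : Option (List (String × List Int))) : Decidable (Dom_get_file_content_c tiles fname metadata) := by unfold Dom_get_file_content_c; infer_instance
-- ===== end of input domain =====

-- B replaces the byte-by-byte accumulation (running index, i%8 / i<len branches) by
-- slicing the tiles into chunks of 8 and joining (','.join inside a chunk, ',\n  ' between
-- chunks), and builds the metadata section by joining per-item blocks instead of += accumulation
-- over key lookups; objective: simpler.

-- shared helpers: both Pythons use the same format template and the same per-key block format string
-- str.capitalize() ported as upper(first) ++ lower(rest); exact on the ASCII domain
def pvCap (s : String) : String :=
  match s.toList with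
  | [] => s
  | c :: t => String.ofList (PySem.Chars.upper [c] ++ PySem.Chars.lower t)

-- the "#define …Length …\nconst unsigned char …[] =\n{\n  …\n};\n" block both Pythons format per key
def pvMetaBlock (fname key : String) (vals : List Int) : String :=
  "#define " ++ fname ++ pvCap key ++ "Length " ++ PySem.Int.toStr (vals.length : Int) ++ "\n"
  ++ ("const unsigned char " ++ fname ++ pvCap key ++ "[] =")
  ++ "\n{\n  "
  ++ PySem.Str.join "," (vals.map PySem.Int.toStr)
  ++ "\n};\n"

-- full_str.format(name=…, content=…, length=…, tilesc=…, metadata=…): the template with its holes filled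
def pvTemplate (fname lenS tilescS content metaS : String) : String :=
  "\n/*\n    " ++ fname ++ ".c\n    \n    Tile Source File.\n    File generated with tileset2gbdk v0.1\n*/ \n\n#define "
  ++ fname ++ "BytesCount " ++ lenS ++ "\n#define " ++ fname ++ "TilesCount " ++ tilescS
  ++ "\n\nconst unsigned char " ++ fname ++ "[] = \n{\n  " ++ content ++ "\n};\n\n" ++ metaS ++ "\n"

-- ===== PORT A =====
-- the body of A's content loop (i, content are the loop state)
def pvStepA (n : Nat) (st : Nat × String) (byte : String) : Nat × String :=
  let i := st.1 + 1
  let c1 := st.2 ++ byte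
  let c2 := if i < n then c1 ++ "," else c1
  let c3 := if i % 8 = 0 ∧ i < n then c2 ++ "\n  " else c2
  (i, c3)

-- int(size/2/8): both float divisions are exact (size < 2^53) and int() truncates a nonnegative
-- value, so this is floor division by 2 then by 8
def get_file_content_c (tiles : List String) (fname : String) (metadata : Option (List (String × List Int))) : String :=
  let size : Int := (tiles.length : Int)
  let content : String := (tiles.foldl (pvStepA tiles.length) (0, "")).2
  let metadata_str : String :=
    match metadata with
    | none => ""
    | some m =>
      -- 'for key in metadata' iterates the keys; metadata[key] is first-match lookup
      (m.map Prod.fst).foldl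
        (fun acc key =>
          acc ++ pvMetaBlock fname key (((m.find? (fun p => p.1 == key)).map Prod.snd).getD []))
        ""
  pvTemplate fname (PySem.Int.toStr size)
    (PySem.Int.toStr (PySem.Int.floordiv (PySem.Int.floordiv size 2) 8)) content metadata_str

-- ===== PORT B =====
def get_file_content_c_alt (tiles : List String) (fname : String) (metadata : Option (List (String × List Int))) : String :=
  let chunks : List (List String) :=
    (PySem.List.pyRange 0 (tiles.length : Int) 8).map
      (fun i => PySem.List.slice tiles (some i) (some (i + 8)))
  let content : String := PySem.Str.join ",\n  " (chunks.map (fun c => PySem.Str.join "," c))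
  let metadata_str : String :=
    match metadata with
    | none => ""
    | some m => PySem.Str.join "" (m.map (fun kv => pvMetaBlock fname kv.1 kv.2))
  pvTemplate fname (PySem.Int.toStr (tiles.length : Int))
    (PySem.Int.toStr (PySem.Int.floordiv (tiles.length : Int) 16)) content metadata_str

-- ===== PRECONDITION & SPEC =====
-- Pre_ excludes a metadata association list with duplicate keys: a Python dict cannot hold
-- duplicate keys (dict construction collapses them), so such a list does not represent any
-- dict input of A, and A's first-match behaviour on it is accidental.
def Pre_get_file_content_c (tiles : List String) (fname : String) (metadata : Option (List (String × List Int))) : Prop :=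
  ((metadata.getD []).map Prod.fst).Nodup
instance (tiles : List String) (fname : String) (metadata : Option (List (String × List Int))) : Decidable (Pre_get_file_content_c tiles fname metadata) := by unfold Pre_get_file_content_c; infer_instance

def pvWitness_get_file_content_c : List String × String × (Option (List (String × List Int))) :=
  (["0x01", "0xff"], "t", some [("pal", [1, 2]), ("map", [3])])

def Spec_get_file_content_c (tiles : List String) (fname : String) (metadata : Option (List (String × List Int))) (out : String) : Prop := out = get_file_content_c_alt tiles fname metadata
instance (tiles : List String) (fname : String) (metadata : Option (List (String × List Int))) (out : String) : Decidable (Spec_get_file_content_c tiles fname metadata out) := by unfold Spec_get_file_content_c; infer_instance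

-- ===== CLAIM (what is proved, stated in full; the proofs are below) =====
def Claim_equal_get_file_content_c : Prop := ∀ (tiles : List String) (fname : String) (metadata : Option (List (String × List Int))), Dom_get_file_content_c tiles fname metadata → Pre_get_file_content_c tiles fname metadata → Spec_get_file_content_c tiles fname metadata (get_file_content_c tiles fname metadata)

-- ===== LEMMAS AND PROOFS =====

-- Str-level unfoldings of join (the Chars lemmas lifted through toList)
theorem pvSjoin_nil (sep : String) : PySem.Str.join sep [] = "" := rfl

theorem pvSjoin_singleton (sep x : String) : PySem.Str.join sep [x] = x := by
  apply String.toList_inj.mp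
  simp [PySem.Str.toList_join, PySem.Chars.join_singleton]

theorem pvSjoin_cons (sep x y : String) (xs : List String) :
    PySem.Str.join sep (x :: y :: xs) = x ++ sep ++ PySem.Str.join sep (y :: xs) := by
  apply String.toList_inj.mp
  simp [PySem.Str.toList_join, PySem.Chars.join_cons_cons]

theorem pvSjoin_empty_cons (x : String) (xs : List String) :
    PySem.Str.join "" (x :: xs) = x ++ PySem.Str.join "" xs := by
  cases xs with
  | nil => simp [pvSjoin_singleton, pvSjoin_nil]
  | cons y ys => rw [pvSjoin_cons]; simp

-- the separator structure of A's content loop: after byte number k+1 comes nothing (last byte),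
-- ",\n  " (multiple of 8) or ","
def pvF : Nat → List String → String
  | _, [] => ""
  | _, [b] => b
  | k, b :: c :: t => b ++ (if (k + 1) % 8 = 0 then ",\n  " else ",") ++ pvF (k + 1) (c :: t)

-- A's fold, started at counter k with k + l.length = n, appends pvF k l
theorem pvFoldA (n : Nat) :
    ∀ (l : List String) (k : Nat) (acc : String), k + l.length = n →
    l.foldl (pvStepA n) (k, acc) = (n, acc ++ pvF k l) := by
  intro l
  induction l with
  | nil => intro k acc h; simp at h; simp [h, pvF]
  | cons b t ih =>
    intro k acc h
    rw [List.foldl_cons, show pvStepA n (k, acc) b = (k + 1,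
          if (k + 1) % 8 = 0 ∧ k + 1 < n then (if k + 1 < n then acc ++ b ++ "," else acc ++ b) ++ "\n  "
          else (if k + 1 < n then acc ++ b ++ "," else acc ++ b)) from rfl]
    cases t with
    | nil =>
      have hn : k + 1 = n := by simpa using h
      have hk : ¬ (k + 1 < n) := by omega
      simp [hn, pvF]
    | cons c t' =>
      have hlt : k + 1 < n := by simp at h; omega
      have h' : (k + 1) + (c :: t').length = n := by simp at h ⊢; omega
      rw [ih (k + 1) _ h']
      by_cases h8 : (k + 1) % 8 = 0
      · simp only [hlt, h8, and_self, if_true, pvF]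
        rw [show (",\n  " : String) = "," ++ "\n  " from by decide]
        simp [String.append_assoc]
      · simp only [h8, false_and, if_false, if_pos hlt, pvF]
        simp [String.append_assoc]

-- inside one chunk (no multiple of 8 strictly inside) pvF is a ','-join
theorem pvF_chunk : ∀ (c : List String) (k : Nat),
    (∀ j, 0 < j → j < c.length → (k + j) % 8 ≠ 0) →
    pvF k c = PySem.Str.join "," c := by
  intro c
  induction c with
  | nil => intro k _; simp [pvF, pvSjoin_nil]
  | cons b t ih =>
    intro k h
    cases t with
    | nil => simp [pvF, pvSjoin_singleton]
    | cons c' t' =>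
      have h1 : (k + 1) % 8 ≠ 0 := h 1 (by omega) (by simp)
      rw [pvF, if_neg h1, pvSjoin_cons,
        ih (k + 1) (fun j hj hjl => by
          have := h (j + 1) (by omega) (by simp at hjl ⊢; omega)
          omega)]

-- a full chunk followed by a nonempty rest
theorem pvF_chunk_append : ∀ (c : List String) (k : Nat) (x : String) (rest : List String),
    c ≠ [] →
    (∀ j, 0 < j → j < c.length → (k + j) % 8 ≠ 0) →
    (k + c.length) % 8 = 0 →
    pvF k (c ++ x :: rest) =
      PySem.Str.join "," c ++ ",\n  " ++ pvF (k + c.length) (x :: rest) := by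
  intro c
  induction c with
  | nil => intro k x rest hne; exact absurd rfl hne
  | cons b t ih =>
    intro k x rest _ hin h8
    cases t with
    | nil =>
      have h8' : (k + 1) % 8 = 0 := by simpa using h8
      simp only [List.cons_append, List.nil_append, pvF, if_pos h8', pvSjoin_singleton,
        List.length_cons, List.length_nil]
    | cons c' t' =>
      have h1 : (k + 1) % 8 ≠ 0 := hin 1 (by omega) (by simp)
      have hcons : (c' :: t') ++ x :: rest = c' :: (t' ++ x :: rest) := by simp
      rw [List.cons_append, hcons, pvF, if_neg h1, ← hcons,
        ih (k + 1) x rest (by simp)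
          (fun j hj hjl => by
            have := hin (j + 1) (by omega) (by simp at hjl ⊢; omega)
            omega)
          (by simp at h8 ⊢; omega),
        pvSjoin_cons]
      simp only [List.length_cons] at *
      rw [show k + (t'.length + 1 + 1) = k + 1 + (t'.length + 1) from by omega]
      simp [String.append_assoc]

-- B's chunk computation (range/slice comprehension) is take-8/drop-8 recursion
def pvChunksRec : List String → List (List String)
  | [] => []
  | b :: t => ((b :: t).take 8) :: pvChunksRec ((b :: t).drop 8)
  termination_by l => l.length
  decreasing_by simp

theorem pvRange8_cons (a b : Int) (h : a < b) :
    PySem.List.pyRange a b 8 = a :: PySem.List.pyRange (a + 8) b 8 := by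
  rw [PySem.List.pyRange_of_pos a b (by norm_num),
    PySem.List.pyRange_of_pos (a + 8) b (by norm_num)]
  by_cases h2 : a + 8 < b
  · rw [if_pos h, if_pos h2]
    have he : ((b - a + 8 - 1) / 8).toNat = ((b - (a + 8) + 8 - 1) / 8).toNat + 1 := by
      omega
    rw [he, List.range_succ_eq_map]
    simp only [List.map_cons, List.map_map]
    congr 1
    · simp
    · refine List.map_congr_left (fun k _ => ?_)
      simp only [Function.comp_apply]
      push_cast
      ring
  · rw [if_pos h, if_neg h2]
    have he : ((b - a + 8 - 1) / 8).toNat = 1 := by omega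
    rw [he]
    simp

theorem pvChunksB (tiles : List String) : ∀ (m a : Nat), tiles.length - a ≤ m →
    (PySem.List.pyRange (a : Int) (tiles.length : Int) 8).map
      (fun i => PySem.List.slice tiles (some i) (some (i + 8))) = pvChunksRec (tiles.drop a) := by
  intro m
  induction m with
  | zero =>
    intro a ha
    have hge : tiles.length ≤ a := by omega
    rw [List.drop_eq_nil_of_le hge]
    rw [PySem.List.pyRange_of_pos _ _ (by norm_num : (0:Int) < 8),
      if_neg (by exact_mod_cast Nat.not_lt.mpr hge)]
    simp [pvChunksRec]
  | succ m ih =>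
    intro a ha
    by_cases hlt : a < tiles.length
    · rw [pvRange8_cons _ _ (by exact_mod_cast hlt), List.map_cons]
      have hslice : PySem.List.slice tiles (some (a : Int)) (some ((a + 8 : Nat) : Int)) =
          (tiles.drop a).take 8 := by
        rw [PySem.List.slice_natCast]
        congr 1
        omega
      obtain ⟨b, t, hbt⟩ := List.exists_cons_of_ne_nil
        (by simp [List.drop_eq_nil_iff]; omega : tiles.drop a ≠ [])
      rw [show ((a : Int) + 8) = ((a + 8 : Nat) : Int) from by push_cast; ring,
        hslice, ih (a + 8) (by omega), hbt]
      rw [show pvChunksRec (b :: t) = ((b :: t).take 8) :: pvChunksRec ((b :: t).drop 8) from by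
        rw [pvChunksRec]]
      rw [← hbt, List.drop_drop]
    · have hge : tiles.length ≤ a := by omega
      rw [List.drop_eq_nil_of_le hge]
      rw [PySem.List.pyRange_of_pos _ _ (by norm_num : (0:Int) < 8),
        if_neg (by exact_mod_cast Nat.not_lt.mpr hge)]
      simp [pvChunksRec]

-- pvF from a multiple of 8 is the chunked double join
theorem pvF_chunks : ∀ (m : Nat) (l : List String), l.length ≤ m → ∀ k, k % 8 = 0 →
    pvF k l = PySem.Str.join ",\n  " ((pvChunksRec l).map (fun c => PySem.Str.join "," c)) := by
  intro m
  induction m with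
  | zero =>
    intro l hl k _
    have hnil : l = [] := List.length_eq_zero_iff.mp (by omega)
    subst hnil
    simp [pvF, pvChunksRec, pvSjoin_nil]
  | succ m ih =>
    intro l hl k hk
    cases l with
    | nil => simp [pvF, pvChunksRec, pvSjoin_nil]
    | cons b t =>
      by_cases hle : t.length + 1 ≤ 8
      · rw [pvF_chunk _ _ (fun j hj hjl => by
          simp only [List.length_cons] at hjl
          omega)]
        rw [pvChunksRec, List.drop_eq_nil_of_le (by simpa using hle),
          List.take_of_length_le (by simpa using hle)]
        simp [pvChunksRec, pvSjoin_singleton]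
      · have hsplit : b :: t = (b :: t).take 8 ++ (b :: t).drop 8 := (List.take_append_drop _ _).symm
        have hlen8 : ((b :: t).take 8).length = 8 := by
          simp only [List.length_take, List.length_cons]; omega
        obtain ⟨x, rest, hxr⟩ := List.exists_cons_of_ne_nil
          (by simp only [ne_eq, List.drop_eq_nil_iff, List.length_cons]; omega :
            (b :: t).drop 8 ≠ [])
        rw [show pvF k (b :: t) = pvF k ((b :: t).take 8 ++ x :: rest) from by rw [← hxr, ← hsplit]]
        rw [pvF_chunk_append _ _ _ _ (by simp)
          (fun j hj hjl => by rw [hlen8] at hjl; omega)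
          (by rw [hlen8]; omega)]
        rw [hlen8, ← hxr, ih ((b :: t).drop 8) (by
          simp only [List.length_drop, List.length_cons] at hl ⊢
          omega) (k + 8) (by omega)]
        rw [pvChunksRec]
        obtain ⟨c0, cs, hcs⟩ := List.exists_cons_of_ne_nil
          (by rw [hxr]; simp [pvChunksRec] : pvChunksRec ((b :: t).drop 8) ≠ [])
        rw [hcs]
        simp only [List.map_cons]
        rw [pvSjoin_cons]

-- first-match lookup of a key of a nodup-keyed list returns the pair's own value
theorem pvLookup : ∀ (m : List (String × List Int)), (m.map Prod.fst).Nodup →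
    ∀ kv ∈ m, ((m.find? (fun p => p.1 == kv.1)).map Prod.snd).getD [] = kv.2 := by
  intro m
  induction m with
  | nil => intro _ kv hkv; simp at hkv
  | cons hd tl ih =>
    intro hnd kv hkv
    simp only [List.map_cons, List.nodup_cons] at hnd
    rcases List.mem_cons.mp hkv with hkv | hkv
    · subst hkv; simp [List.find?]
    · have hne : hd.1 ≠ kv.1 := by
        intro he
        exact hnd.1 (he ▸ (List.mem_map.mpr ⟨kv, hkv, rfl⟩))
      rw [List.find?]
      simp only [beq_eq_false_iff_ne.mpr hne]
      exact ih hnd.2 kv hkv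

-- fold of string appends = join "" of the mapped list
theorem pvFoldJoin (f : String → String) : ∀ (keys : List String) (acc : String),
    keys.foldl (fun a k => a ++ f k) acc = acc ++ PySem.Str.join "" (keys.map f) := by
  intro keys
  induction keys with
  | nil => intro acc; simp [pvSjoin_nil]
  | cons k t ih => intro acc; simp [ih, pvSjoin_empty_cons, String.append_assoc]

theorem pvTilesc (n : Nat) :
    PySem.Int.floordiv (PySem.Int.floordiv (n : Int) 2) 8 = PySem.Int.floordiv (n : Int) 16 := by
  have h2 : ((2 : Nat) : Int) = (2 : Int) := by norm_num
  have h8 : ((8 : Nat) : Int) = (8 : Int) := by norm_num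
  have h16 : ((16 : Nat) : Int) = (16 : Int) := by norm_num
  rw [← h2, PySem.Int.floordiv_natCast, ← h8, PySem.Int.floordiv_natCast, ← h16,
    PySem.Int.floordiv_natCast, Nat.div_div_eq_div_mul]

-- ===== VERDICT (by name: the statement is the Claim_ definition above) =====
theorem get_file_content_c_spec : Claim_equal_get_file_content_c := by
  intro tiles fname metadata _ hpre
  unfold Spec_get_file_content_c
  have hcontent : (tiles.foldl (pvStepA tiles.length) (0, "")).2 =
      PySem.Str.join ",\n  "
        (((PySem.List.pyRange 0 (tiles.length : Int) 8).map
            (fun i => PySem.List.slice tiles (some i) (some (i + 8)))).map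
          (fun c => PySem.Str.join "," c)) := by
    rw [pvFoldA tiles.length tiles 0 "" (by simp)]
    rw [show ((0 : Int)) = ((0 : Nat) : Int) from by norm_num,
      pvChunksB tiles tiles.length 0 (by omega), List.drop_zero]
    have h := pvF_chunks tiles.length tiles (le_refl _) 0 (by omega)
    rw [h]
    simp
  cases metadata with
  | none =>
    simp only [get_file_content_c, get_file_content_c_alt]
    rw [hcontent, pvTilesc]
  | some mv =>
    have hpre' : (mv.map Prod.fst).Nodup := by
      simpa [Pre_get_file_content_c] using hpre
    simp only [get_file_content_c, get_file_content_c_alt]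
    rw [hcontent, pvTilesc]
    rw [pvFoldJoin (fun key => pvMetaBlock fname key
      (((mv.find? (fun p => p.1 == key)).map Prod.snd).getD []))]
    have hm : (mv.map Prod.fst).map (fun key => pvMetaBlock fname key
        (((mv.find? (fun p => p.1 == key)).map Prod.snd).getD [])) =
        mv.map (fun kv => pvMetaBlock fname kv.1 kv.2) := by
      rw [List.map_map]
      exact List.map_congr_left (fun kv hkv => by
        simp only [Function.comp_apply]
        rw [pvLookup mv hpre' kv hkv])
    rw [hm]
    simp
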